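-- pv_equiv track=rewrite | github.com/thmasker/ComputerGraphics | extrusion/src/utils.py | getBoundaryEdges
-- ===== SOURCE A (Python) =====
-- from typing import List, Tuple
--
-- def getBoundaryEdges(edges: List[Tuple[int]]) -> List[Tuple[int]]:
--     '''
--     Input: [(v1, v2), (v2, v3) ...] => Output: [(v1, v2), ...] only the boundary edges
--     '''
--     i = 0
--     while i < len(edges):
--         j = i + 1
--         removed = False
--         while j < len(edges):
--             if sorted(edges[i]) == sorted(edges[j]):
--                 edges.pop(i)
--                 edges.pop(j - 1)
--
--                 removed = True
--
--             j += 1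
--         if not removed:
--             i += 1
--
--     return edges
-- ===== SOURCE B (Python) =====
-- def getBoundaryEdges(edges):
--     '''
--     Input: [(v1, v2), (v2, v3) ...] => Output: [(v1, v2), ...] only the boundary edges
--     '''
--     boundary = {}
--     for edge in edges:
--         key = tuple(sorted(edge))
--         if key in boundary:
--             del boundary[key]
--         else:
--             boundary[key] = edge
--     return list(boundary.values())
-- ===== Notes on version B (the rewrite author's own statement) =====
-- stated objective: faster
-- what changed: B replaces A's quadratic nested while loops with in-place pop/index juggling by one pass over the edges toggling a dict keyed by the sorted edge (insert on first sight, delete on the matching second sight) and returning the dict's values; Pre_ excludes inputs where some normalized edge key occurs three or more times, on which which occurrence survives and where it sits in the output are accidents of A's index-shifting pop cascade.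
-- outside the precondition, e.g. on getBoundaryEdges([(1, 2), (1, 2), (1, 2), (1, 2), (2, 1)]): A returns [(1, 2)], B returns [(2, 1)]
import Mathlib
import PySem

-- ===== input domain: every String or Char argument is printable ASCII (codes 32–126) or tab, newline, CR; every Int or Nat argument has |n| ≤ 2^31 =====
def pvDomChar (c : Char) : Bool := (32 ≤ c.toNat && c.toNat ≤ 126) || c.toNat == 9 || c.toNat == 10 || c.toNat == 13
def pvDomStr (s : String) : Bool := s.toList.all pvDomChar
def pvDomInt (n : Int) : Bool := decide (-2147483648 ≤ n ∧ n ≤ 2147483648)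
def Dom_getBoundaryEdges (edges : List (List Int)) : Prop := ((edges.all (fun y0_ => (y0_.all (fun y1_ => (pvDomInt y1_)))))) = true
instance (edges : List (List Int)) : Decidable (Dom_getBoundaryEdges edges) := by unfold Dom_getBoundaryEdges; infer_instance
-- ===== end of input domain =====

-- B replaces A's quadratic in-place nested while loops by one pass toggling a dict keyed by the
-- sorted edge; equality is about the RETURN value only (A mutates and returns its argument list,
-- B builds a fresh list).

-- sorted(e): Python's sorted on a list of ints
def pvKey (e : List Int) : List Int := PySem.List.sorted e (fun x => x) false

-- ===== PORT A =====
-- inner while loop of A; fuel is only a structural totality guard: the loop runs at most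
-- items.length iterations (j grows by 1 each iteration, the length never grows), so the
-- fuel-0 branch is never reached from the entry point below.
-- edges.pop(i) and edges.pop(j-1) are in range whenever executed (i < j < len at every
-- comparison reached from the entry point), so pop is exactly List.eraseIdx and the indexing
-- items[i]/items[j] via getD is exact for the same reason.
def aInnerF : Nat → List (List Int) → Nat → Nat → Bool → List (List Int) × Bool
  | 0, items, _, _, removed => (items, removed)
  | fuel + 1, items, i, j, removed =>
    if j < items.length then
      if pvKey (items.getD i []) = pvKey (items.getD j []) then
        aInnerF fuel ((items.eraseIdx i).eraseIdx (j - 1)) i (j + 1) true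
      else
        aInnerF fuel items i (j + 1) removed
    else
      (items, removed)

-- outer while loop of A; each iteration either increments i (length unchanged) or shrinks
-- the list by at least 2 (i unchanged), so 2*length+1 fuel is never exhausted.
def aOuterF : Nat → List (List Int) → Nat → List (List Int)
  | 0, items, _ => items
  | fuel + 1, items, i =>
    if i < items.length then
      let p := aInnerF items.length items i (i + 1) false
      if p.2 = true then aOuterF fuel p.1 i else aOuterF fuel p.1 (i + 1)
    else
      items

def getBoundaryEdges (edges : List (List Int)) : List (List Int) :=
  aOuterF (2 * edges.length + 1) edges 0

-- ===== PORT B =====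
-- body of B's single for-loop: toggle the dict entry for the normalized key
def bStep (d : PySem.Dict (List Int) (List Int)) (edge : List Int) :
    PySem.Dict (List Int) (List Int) :=
  let key := pvKey edge
  if d.contains key then d.erase key else d.insert key edge

def getBoundaryEdges_alt (edges : List (List Int)) : List (List Int) :=
  (edges.foldl bStep PySem.Dict.empty).values

-- ===== PRECONDITION & SPEC =====
-- number of edges in l whose normalized key is k
def keyCnt (l : List (List Int)) (k : List Int) : Nat := l.countP (fun e => pvKey e == k)

-- Pre_ excludes inputs where some normalized edge key occurs three or more times: there A still
-- returns a value, but which occurrence survives and where it sits in the output are accidents of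
-- A's index-shifting pop cascade (any single representative of an odd-count key is defensible).
def Pre_getBoundaryEdges (edges : List (List Int)) : Prop :=
  ∀ e ∈ edges, keyCnt edges (pvKey e) ≤ 2
instance (edges : List (List Int)) : Decidable (Pre_getBoundaryEdges edges) := by unfold Pre_getBoundaryEdges; infer_instance

def pvWitness_getBoundaryEdges : List (List Int) := [[1, 2], [2, 1], [3, 1]]

def Spec_getBoundaryEdges (edges : List (List Int)) (out : List (List Int)) : Prop := out = getBoundaryEdges_alt edges
instance (edges : List (List Int)) (out : List (List Int)) : Decidable (Spec_getBoundaryEdges edges out) := by unfold Spec_getBoundaryEdges; infer_instance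

-- ===== CLAIM (what is proved, stated in full; the proofs are below) =====
def Claim_equal_getBoundaryEdges : Prop := ∀ (edges : List (List Int)), Dom_getBoundaryEdges edges → Pre_getBoundaryEdges edges → Spec_getBoundaryEdges edges (getBoundaryEdges edges)

-- ===== LEMMAS AND PROOFS =====

theorem keyCnt_append (l m : List (List Int)) (k : List Int) :
    keyCnt (l ++ m) k = keyCnt l k + keyCnt m k := by
  simp [keyCnt]

theorem keyCnt_cons (e : List Int) (l : List (List Int)) (k : List Int) :
    keyCnt (e :: l) k = (if pvKey e == k then 1 else 0) + keyCnt l k := by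
  simp only [keyCnt, List.countP_cons]
  split_ifs <;> omega

theorem keyCnt_sublist {V l : List (List Int)} (h : List.Sublist V l) (k : List Int) :
    keyCnt V k ≤ keyCnt l k := h.countP_le

theorem one_le_countP {α : Type} {p : α → Bool} {l : List α} {a : α}
    (ha : a ∈ l) (hpa : p a = true) : 1 ≤ l.countP p := by
  induction l with
  | nil => simp at ha
  | cons x l ih =>
    rw [List.countP_cons]
    rcases List.mem_cons.mp ha with rfl | h
    · simp [hpa]
    · have := ih h; omega

theorem keyCnt_pos_of_mem {l : List (List Int)} {e : List Int} (h : e ∈ l) :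
    0 < keyCnt l (pvKey e) := one_le_countP h (by simp)

theorem exists_of_keyCnt_pos {l : List (List Int)} {k : List Int}
    (h : 0 < keyCnt l k) : ∃ e ∈ l, pvKey e = k := by
  induction l with
  | nil => simp [keyCnt] at h
  | cons x l ih =>
    rw [keyCnt_cons] at h
    by_cases hx : pvKey x == k
    · exact ⟨x, List.mem_cons_self, by simpa using hx⟩
    · rw [if_neg hx] at h
      obtain ⟨e, he, hek⟩ := ih (by omega)
      exact ⟨e, List.mem_cons_of_mem _ he, hek⟩

-- a list with two distinct members satisfying p has countP ≥ 2
theorem two_le_countP {α : Type} {p : α → Bool} :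
    ∀ {l : List α} {a b : α}, a ∈ l → b ∈ l → a ≠ b → p a = true → p b = true →
    2 ≤ l.countP p := by
  intro l
  induction l with
  | nil => intro a b ha; simp at ha
  | cons x l ih =>
    intro a b ha hb hne hpa hpb
    rw [List.countP_cons]
    rcases List.mem_cons.mp ha with rfl | ha'
    · rcases List.mem_cons.mp hb with rfl | hb'
      · exact absurd rfl hne
      · have h1 := one_le_countP hb' hpb
        have h2 : List.countP p l + (if p a = true then 1 else 0) = List.countP p l + 1 := by
          rw [hpa]; simp
        omega
    · rcases List.mem_cons.mp hb with rfl | hb'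
      · have h1 := one_le_countP ha' hpa
        have h2 : List.countP p l + (if p b = true then 1 else 0) = List.countP p l + 1 := by
          rw [hpb]; simp
        omega
      · have := ih ha' hb' hne hpa hpb
        omega

-- filter over a sublist that preserves the counts of all P-elements
theorem filter_sublist_eq {α : Type} [BEq α] [LawfulBEq α] {P : α → Bool} {V l : List α}
    (hsub : List.Sublist V l) :
    (∀ a, P a = true → l.count a = V.count a) → l.filter P = V.filter P := by
  induction hsub with
  | slnil => intro _; rfl
  | @cons l₁ l₂ a hs ih =>
    intro hcnt
    have hPa : P a = false := by
      by_contra hPa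
      rw [Bool.not_eq_false] at hPa
      have h1 := hcnt a hPa
      have h2 : l₁.count a ≤ l₂.count a := hs.count_le a
      rw [List.count_cons_self] at h1
      omega
    rw [List.filter_cons_of_neg (by simp [hPa])]
    apply ih
    intro b hPb
    have h1 := hcnt b hPb
    rw [List.count_cons] at h1
    by_cases hba : b = a
    · subst hba; rw [hPb] at hPa; cases hPa
    · have hab : ¬ (a = b) := fun hh => hba hh.symm
      simpa [hba, hab] using h1
  | @cons₂ l₁ l₂ a hs ih =>
    intro hcnt
    have hrest : ∀ b, P b = true → l₂.count b = l₁.count b := by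
      intro b hPb
      have h1 := hcnt b hPb
      simp only [List.count_cons] at h1
      omega
    rw [List.filter_cons, List.filter_cons, ih hrest]

theorem aInnerF_stop (fuel : Nat) (items : List (List Int)) (i j : Nat) (r : Bool)
    (hj : ¬ j < items.length) : aInnerF fuel items i j r = (items, r) := by
  cases fuel with
  | zero => rfl
  | succ fuel => simp [aInnerF, hj]

theorem getD_append_cons (S : List (List Int)) (a : List Int) (L : List (List Int))
    (d : List Int) : (S ++ a :: L).getD S.length d = a := by
  induction S with
  | nil => rfl
  | cons s S ih => simpa using ih

theorem getD_mid (S : List (List Int)) (a : List Int) (K : List (List Int)) (x : List Int)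
    (L : List (List Int)) (d : List Int) :
    (S ++ a :: (K ++ x :: L)).getD (S.length + 1 + K.length) d = x := by
  induction S with
  | nil =>
    have := getD_append_cons (a :: K) x L d
    simpa [Nat.add_comm] using this
  | cons s S ih =>
    have hidx : (s :: S).length + 1 + K.length = (S.length + 1 + K.length) + 1 := by
      simp [List.length_cons]; omega
    rw [List.cons_append, hidx, List.getD_cons_succ]
    exact ih

theorem eraseIdx_append_cons (S : List (List Int)) (a : List Int) (L : List (List Int)) :
    (S ++ a :: L).eraseIdx S.length = S ++ L := by
  induction S with
  | nil => rfl
  | cons s S ih => simpa using ih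

-- specification of A's inner loop: it returns the prefix S untouched together with a rest V
-- obtained from h :: (M ++ U) by deleting complete same-key pairs
theorem inner_spec : ∀ (fuel : Nat) (S M U : List (List Int)) (h : List Int) (r : Bool),
    U.length ≤ fuel →
    (∀ k, keyCnt (S ++ h :: (M ++ U)) k ≤ 2) →
    ∃ V b,
      aInnerF fuel (S ++ h :: (M ++ U)) S.length (S.length + 1 + M.length) r = (S ++ V, b) ∧
      List.Sublist V (h :: (M ++ U)) ∧
      (∀ k, keyCnt V k = keyCnt (h :: (M ++ U)) k ∨ keyCnt V k + 2 = keyCnt (h :: (M ++ U)) k) ∧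
      (r = true → b = true) ∧
      (r = false → b = false → V = h :: (M ++ U) ∧ ∀ y ∈ U, pvKey y ≠ pvKey h) ∧
      (r = false → b = true → V.length + 2 ≤ M.length + U.length + 1) := by
  intro fuel
  induction fuel with
  | zero =>
    intro S M U h r hU _
    have hUnil : U = [] := List.eq_nil_of_length_eq_zero (by omega)
    subst hUnil
    refine ⟨h :: (M ++ []), r, rfl, List.Sublist.refl _, fun k => Or.inl rfl, ?_, ?_, ?_⟩
    · intro hr; exact hr
    · intro _ _; exact ⟨rfl, by simp⟩
    · intro hr hb; subst hr; exact absurd hb (by decide)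
  | succ fuel ih =>
    intro S M U h r hU hbnd
    cases U with
    | nil =>
      rw [aInnerF_stop _ _ _ _ _ (by simp; omega)]
      refine ⟨h :: (M ++ []), r, rfl, List.Sublist.refl _, fun k => Or.inl rfl, ?_, ?_, ?_⟩
      · intro hr; exact hr
      · intro _ _; exact ⟨rfl, by simp⟩
      · intro hr hb; subst hr; exact absurd hb (by decide)
    | cons x U' =>
      have hjlt : S.length + 1 + M.length < (S ++ h :: (M ++ x :: U')).length := by
        simp; omega
      rw [show aInnerF (fuel + 1) (S ++ h :: (M ++ x :: U')) S.length (S.length + 1 + M.length) r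
            = if S.length + 1 + M.length < (S ++ h :: (M ++ x :: U')).length then
                (if pvKey ((S ++ h :: (M ++ x :: U')).getD S.length []) =
                    pvKey ((S ++ h :: (M ++ x :: U')).getD (S.length + 1 + M.length) []) then
                  aInnerF fuel (((S ++ h :: (M ++ x :: U')).eraseIdx S.length).eraseIdx
                    (S.length + 1 + M.length - 1)) S.length (S.length + 1 + M.length + 1) true
                else
                  aInnerF fuel (S ++ h :: (M ++ x :: U')) S.length
                    (S.length + 1 + M.length + 1) r)
              else ((S ++ h :: (M ++ x :: U')), r) from rfl]
      rw [if_pos hjlt, getD_append_cons, getD_mid]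
      by_cases hk : pvKey h = pvKey x
      · rw [if_pos hk]
        rw [eraseIdx_append_cons]
        have hsub1 : List.Sublist (M ++ U') (h :: (M ++ x :: U')) :=
          List.Sublist.cons _ (List.Sublist.append_left (List.sublist_cons_self x U') M)
        have hj1 : S.length + 1 + M.length - 1 = (S ++ M).length := by simp
        have hre : S ++ (M ++ x :: U') = (S ++ M) ++ x :: U' := by simp
        rw [hj1, hre, eraseIdx_append_cons]
        have hre2 : (S ++ M) ++ U' = S ++ (M ++ U') := by simp
        rw [hre2]
        -- per-key count of the original rest region in terms of the shrunk one
        have hcnt2 : ∀ k, keyCnt (h :: (M ++ x :: U')) k =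
            keyCnt (M ++ U') k + (if pvKey h == k then 2 else 0) := by
          intro k
          rw [keyCnt_cons]
          rw [show M ++ x :: U' = M ++ [x] ++ U' by simp, keyCnt_append, keyCnt_append,
            keyCnt_append]
          rw [show keyCnt [x] k = if pvKey x == k then 1 else 0 by
            rw [show ([x] : List (List Int)) = x :: [] from rfl, keyCnt_cons]; simp [keyCnt]]
          rw [← hk]
          split_ifs <;> omega
        cases hMU : M ++ U' with
        | nil =>
          rw [aInnerF_stop _ _ _ _ _ (by simp; omega)]
          refine ⟨[], true, by simp, List.nil_sublist _, ?_, fun _ => rfl, ?_, ?_⟩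
          · intro k
            have h2 := hcnt2 k
            rw [hMU] at h2
            have h0 : keyCnt ([] : List (List Int)) k = 0 := by simp [keyCnt]
            rw [h0] at h2 ⊢
            split_ifs at h2 <;> omega
          · intro _ hb; exact absurd hb (by decide)
          · intro _ _
            have hlen0 := congrArg List.length hMU
            simp at hlen0 ⊢
            omega
        | cons h₂ rest =>
          have hrestlen : rest.length = M.length + U'.length - 1 := by
            have := congrArg List.length hMU
            simp at this; omega
          by_cases hU'2 : U'.length < 2
          · -- scan pointer ran past the end: loop stops
            rw [aInnerF_stop _ _ _ _ _ (by simp; omega)]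
            refine ⟨M ++ U', true, by rw [hMU], hsub1, ?_, fun _ => rfl, ?_, ?_⟩
            · intro k
              have h2 := hcnt2 k
              split_ifs at h2 <;> omega
            · intro _ hb; exact absurd hb (by decide)
            · intro _ _; simp
          · -- continue scanning with the new head h₂
            have htd : rest.take (M.length + 1) ++ rest.drop (M.length + 1) = rest :=
              List.take_append_drop _ _
            have htlen : (rest.take (M.length + 1)).length = M.length + 1 := by
              rw [List.length_take]; omega
            have hbnd' : ∀ k, keyCnt (S ++ h₂ :: (rest.take (M.length + 1) ++
                rest.drop (M.length + 1))) k ≤ 2 := by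
              intro k
              have hx : S ++ h₂ :: (rest.take (M.length + 1) ++ rest.drop (M.length + 1))
                  = S ++ (M ++ U') := by rw [htd, ← hMU]
              rw [hx]
              exact le_trans (keyCnt_sublist (List.Sublist.append_left hsub1 S) k) (hbnd k)
            obtain ⟨V, b, heq, hsubV, hcntV, hrt, _, _⟩ :=
              ih S (rest.take (M.length + 1)) (rest.drop (M.length + 1)) h₂ true
                (by
                  rw [List.length_drop]
                  simp only [List.length_cons] at hU
                  omega) hbnd'
            have hb : b = true := hrt rfl
            subst hb
            rw [htd] at heq
            rw [show S.length + 1 + (rest.take (M.length + 1)).length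
                  = S.length + 1 + M.length + 1 by rw [htlen]; omega] at heq
            have hmid : ∀ k, keyCnt (h₂ :: (rest.take (M.length + 1) ++
                rest.drop (M.length + 1))) k = keyCnt (M ++ U') k := by
              intro k; rw [htd, ← hMU]
            have hsubV' : List.Sublist V (h :: (M ++ x :: U')) := by
              rw [htd] at hsubV
              rw [← hMU] at hsubV
              exact List.Sublist.trans hsubV hsub1
            refine ⟨V, true, heq, hsubV', ?_, fun _ => rfl, ?_, ?_⟩
            · intro k
              have h1 := hcntV k
              rw [hmid k] at h1
              have h2 := hcnt2 k
              have h3 : keyCnt (h :: (M ++ x :: U')) k ≤ 2 := by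
                have h4 := hbnd k
                rw [keyCnt_append] at h4
                omega
              split_ifs at h2 <;> omega
            · intro _ hb2; exact absurd hb2 (by decide)
            · intro _ _
              have h4 := List.Sublist.length_le hsubV
              have h5 : (rest.drop (M.length + 1)).length = rest.length - (M.length + 1) :=
                List.length_drop
              simp only [List.length_cons, List.length_append, htlen, h5] at h4
              simp only [List.length_cons]
              omega
      · rw [if_neg hk]
        have hre : M ++ x :: U' = (M ++ [x]) ++ U' := by simp
        have hbnd' : ∀ k, keyCnt (S ++ h :: ((M ++ [x]) ++ U')) k ≤ 2 := by
          intro k; rw [← hre]; exact hbnd k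
        obtain ⟨V, b, heq, hsubV, hcntV, hrt, hbf, hbt⟩ :=
          ih S (M ++ [x]) U' h r (by simp at hU ⊢; omega) hbnd'
        rw [show S.length + 1 + (M ++ [x]).length = S.length + 1 + M.length + 1 by simp; omega] at heq
        rw [← hre] at heq
        refine ⟨V, b, heq, by rw [hre]; exact hsubV, by rw [hre]; exact hcntV, hrt, ?_, ?_⟩
        · intro hr hb
          obtain ⟨hV, hall⟩ := hbf hr hb
          refine ⟨by rw [hre]; exact hV, ?_⟩
          intro y hy
          rcases List.mem_cons.mp hy with rfl | hy'
          · exact fun hxy => hk hxy.symm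
          · exact hall y hy'
        · intro hr hb
          have := hbt hr hb
          simp at this ⊢
          omega

-- specification of A's outer loop
theorem outer_spec : ∀ (fuel : Nat) (S rest : List (List Int)),
    rest.length < fuel →
    (∀ k, keyCnt (S ++ rest) k ≤ 2) →
    (∀ y ∈ S, keyCnt (S ++ rest) (pvKey y) = 1) →
    aOuterF fuel (S ++ rest) S.length =
      S ++ rest.filter (fun e => keyCnt (S ++ rest) (pvKey e) == 1) := by
  intro fuel
  induction fuel with
  | zero => intro S rest h; omega
  | succ fuel ih =>
    intro S rest hlen hbnd hS
    cases rest with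
    | nil =>
      rw [aOuterF, if_neg (by simp)]
      simp
    | cons h T =>
      obtain ⟨V, b, heq, hsubV, hcntV, _, hbf, hbt⟩ :=
        inner_spec (S ++ h :: T).length S [] T h false (by simp; omega)
          (by intro k; simpa using hbnd k)
      simp only [List.nil_append, List.length_nil, Nat.add_zero] at heq
      rw [aOuterF, if_pos (by simp)]
      simp only [heq]
      cases b with
      | false =>
        obtain ⟨hV, hnomatch⟩ := hbf rfl rfl
        simp only [List.nil_append] at hV hnomatch
        subst hV
        rw [if_neg (by simp)]
        -- the head's key occurs exactly once in the whole list
        have hTcnt : keyCnt T (pvKey h) = 0 := by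
          rw [keyCnt, List.countP_eq_zero]
          intro y hy
          simp [hnomatch y hy]
        have hScnt : keyCnt S (pvKey h) = 0 := by
          by_contra hne
          obtain ⟨s, hs, hsk⟩ := exists_of_keyCnt_pos (Nat.pos_of_ne_zero hne)
          have h1 := hS s hs
          rw [hsk] at h1
          rw [keyCnt_append, keyCnt_cons] at h1
          simp at h1
          omega
        have hhcnt : keyCnt (S ++ h :: T) (pvKey h) = 1 := by
          rw [keyCnt_append, keyCnt_cons]
          simp [hScnt, hTcnt]
        have hrw : (S ++ [h]) ++ T = S ++ h :: T := by simp
        have hrec := ih (S ++ [h]) T (by simp at hlen ⊢; omega)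
          (by intro k; rw [hrw]; exact hbnd k)
          (by
            intro y hy
            rw [hrw]
            rcases List.mem_append.mp hy with hy' | hy'
            · exact hS y hy'
            · rw [List.mem_singleton] at hy'
              subst hy'
              exact hhcnt)
        rw [hrw] at hrec
        rw [show (S ++ [h]).length = S.length + 1 by simp] at hrec
        rw [hrec]
        rw [List.filter_cons_of_pos (by simp [hhcnt])]
        simp
      | true =>
        have hVlen := hbt rfl rfl
        simp only [List.nil_append, List.length_nil] at hVlen hsubV hcntV
        rw [if_pos rfl]
        have hVbnd : ∀ k, keyCnt (S ++ V) k ≤ 2 := by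
          intro k
          have h1 := keyCnt_sublist hsubV k
          have h2 := hbnd k
          rw [keyCnt_append] at h2 ⊢
          omega
        have hrec := ih S V (by simp at hlen; omega) hVbnd
          (by
            intro y hy
            have h1 := hS y hy
            have h2 := keyCnt_sublist hsubV (pvKey y)
            have h3 : 0 < keyCnt (S ++ V) (pvKey y) :=
              keyCnt_pos_of_mem (List.mem_append_left _ hy)
            rw [keyCnt_append] at h1 h3 ⊢
            omega)
        rw [hrec]
        congr 1
        -- step 1: the filter predicate w.r.t. the shrunk list agrees on V with the old one
        have hstep1 : V.filter (fun e => keyCnt (S ++ V) (pvKey e) == 1) =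
            V.filter (fun e => keyCnt (S ++ h :: T) (pvKey e) == 1) := by
          apply List.filter_congr
          intro e he
          have h1 := hcntV (pvKey e)
          have h2 := hbnd (pvKey e)
          have h3 : 0 < keyCnt V (pvKey e) := keyCnt_pos_of_mem he
          rw [keyCnt_append] at h2
          rcases h1 with h1 | h1
          · rw [keyCnt_append, keyCnt_append, h1]
          · exfalso; omega
        rw [hstep1]
        -- step 2: the elements dropped by A (cancelled pairs) never satisfy the predicate
        symm
        apply filter_sublist_eq hsubV
        intro a hPa
        have hPa' : keyCnt (S ++ h :: T) (pvKey a) = 1 := by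
          simpa using hPa
        rw [keyCnt_append] at hPa'
        have holdle : keyCnt (h :: T) (pvKey a) ≤ 1 := by omega
        by_cases hmem : a ∈ h :: T
        · have holdpos : 0 < keyCnt (h :: T) (pvKey a) := keyCnt_pos_of_mem hmem
          have hold1 : keyCnt (h :: T) (pvKey a) = 1 := by omega
          have hcount_old : (h :: T).count a = 1 := by
            have hle : (h :: T).count a ≤ keyCnt (h :: T) (pvKey a) := by
              apply List.countP_mono_left
              intro x _ hxa
              have : x = a := by simpa using hxa
              subst this; simp
            have hge : 0 < (h :: T).count a := List.count_pos_iff.mpr hmem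
            omega
          have hVcnt1 : keyCnt V (pvKey a) = 1 := by
            rcases hcntV (pvKey a) with h1 | h1 <;> omega
          have hmemV : a ∈ V := by
            obtain ⟨e, heV, hek⟩ := exists_of_keyCnt_pos (l := V) (k := pvKey a) (by omega)
            by_cases hea : e = a
            · subst hea; exact heV
            · exfalso
              have h2le : 2 ≤ keyCnt (h :: T) (pvKey a) := by
                apply two_le_countP (List.Sublist.subset hsubV heV) hmem hea
                · simp [hek]
                · simp
              omega
          have hcount_V : V.count a = 1 := by
            have hle : V.count a ≤ keyCnt V (pvKey a) := by
              apply List.countP_mono_left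
              intro x _ hxa
              have : x = a := by simpa using hxa
              subst this; simp
            have hge : 0 < V.count a := List.count_pos_iff.mpr hmemV
            omega
          rw [hcount_old, hcount_V]
        · rw [List.count_eq_zero_of_not_mem hmem,
            List.count_eq_zero_of_not_mem (fun hmV => hmem (List.Sublist.subset hsubV hmV))]

-- the dict held by B's fold after processing p: one entry per key occurring exactly once in p
def bDict (p : List (List Int)) : PySem.Dict (List Int) (List Int) :=
  PySem.Dict.mk ((p.filter (fun e => keyCnt p (pvKey e) == 1)).map (fun e => (pvKey e, e)))

theorem bDict_contains (p : List (List Int)) (k : List Int) :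
    (bDict p).contains k = true ↔ keyCnt p k = 1 := by
  rw [bDict, PySem.Dict.contains_eq_decide_mem_keys, PySem.Dict.keys_mk]
  simp only [decide_eq_true_eq, List.map_map, List.mem_map, Function.comp]
  constructor
  · rintro ⟨x, hx, rfl⟩
    rw [List.mem_filter] at hx
    simpa using hx.2
  · intro h1
    obtain ⟨e, he, hek⟩ := exists_of_keyCnt_pos (l := p) (k := k) (by omega)
    refine ⟨e, ?_, hek⟩
    rw [List.mem_filter]
    exact ⟨he, by simp [hek, h1]⟩

-- PySem.Dict internals, made explicit for the two dict operations B uses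
theorem dict_erase_eq (l : List (List Int × List Int)) (k : List Int) :
    (PySem.Dict.mk l).erase k = PySem.Dict.mk (l.filter (fun q => !(q.1 == k))) := by
  simp [PySem.Dict.erase]

theorem dict_insert_append (l : List (List Int × List Int)) (k v : List Int)
    (h : (PySem.Dict.mk l).contains k = false) :
    (PySem.Dict.mk l).insert k v = PySem.Dict.mk (l ++ [(k, v)]) := by
  apply PySem.Dict.ext
  rw [PySem.Dict.items_insert_of_not_contains _ _ h]

theorem bStep_eq (p : List (List Int)) (e : List Int)
    (hle : keyCnt p (pvKey e) ≤ 1) :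
    bStep (bDict p) e = bDict (p ++ [e]) := by
  have hkey_e : keyCnt (p ++ [e]) (pvKey e) = keyCnt p (pvKey e) + 1 := by
    have h5 : keyCnt [e] (pvKey e) = 1 := by simp [keyCnt, List.countP_cons]
    rw [keyCnt_append, h5]
  have hkey_ne : ∀ x, pvKey x ≠ pvKey e →
      keyCnt (p ++ [e]) (pvKey x) = keyCnt p (pvKey x) := by
    intro x hne
    rw [keyCnt_append]
    have : keyCnt [e] (pvKey x) = 0 := by
      simp [keyCnt]
      exact fun hc => absurd hc.symm hne
    omega
  rw [show bStep (bDict p) e = if (bDict p).contains (pvKey e) = true then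
        (bDict p).erase (pvKey e) else (bDict p).insert (pvKey e) e from rfl]
  rcases Nat.le_one_iff_eq_zero_or_eq_one.mp hle with h0 | h1
  · -- key unseen so far: insert appends the new entry
    have hcontains : (bDict p).contains (pvKey e) = false := by
      rw [Bool.eq_false_iff]
      intro hc
      rw [bDict_contains] at hc
      omega
    rw [if_neg (by simp [hcontains]), show bDict p =
      PySem.Dict.mk ((p.filter (fun e => keyCnt p (pvKey e) == 1)).map (fun e => (pvKey e, e)))
      from rfl]
    rw [dict_insert_append _ _ _ hcontains]
    unfold bDict
    congr 1
    rw [List.filter_append]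
    have hfe : [e].filter (fun x => keyCnt (p ++ [e]) (pvKey x) == 1) = [e] := by
      simp [hkey_e, h0]
    rw [hfe]
    have hfp : p.filter (fun x => keyCnt (p ++ [e]) (pvKey x) == 1) =
        p.filter (fun x => keyCnt p (pvKey x) == 1) := by
      apply List.filter_congr
      intro x hx
      have hne : pvKey x ≠ pvKey e := by
        intro hequ
        have := keyCnt_pos_of_mem hx
        rw [hequ] at this
        omega
      rw [hkey_ne x hne]
    rw [hfp, List.map_append]
    rfl
  · -- key seen once: erase deletes that entry
    have hcontains : (bDict p).contains (pvKey e) = true := (bDict_contains p _).mpr h1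
    rw [if_pos hcontains, show bDict p =
      PySem.Dict.mk ((p.filter (fun e => keyCnt p (pvKey e) == 1)).map (fun e => (pvKey e, e)))
      from rfl]
    rw [dict_erase_eq]
    unfold bDict
    congr 1
    rw [List.filter_map]
    have hfe : [e].filter (fun x => keyCnt (p ++ [e]) (pvKey x) == 1) = [] := by
      simp [hkey_e, h1]
    rw [List.filter_append, hfe, List.append_nil, List.filter_filter]
    congr 1
    apply List.filter_congr
    intro x hx
    by_cases hxe : pvKey x = pvKey e
    · have hnew : keyCnt (p ++ [e]) (pvKey e) = 2 := by rw [hkey_e, h1]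
      simp [Function.comp, hxe, hnew]
    · have hbe : (pvKey x == pvKey e) = false := by simp [hxe]
      rw [hkey_ne x hxe]
      simp [Function.comp, hbe]

theorem fold_spec : ∀ (U p : List (List Int)),
    (∀ k, keyCnt (p ++ U) k ≤ 2) →
    U.foldl bStep (bDict p) = bDict (p ++ U) := by
  intro U
  induction U with
  | nil => intro p _; simp
  | cons e U' ih =>
    intro p hbnd
    have hle : keyCnt p (pvKey e) ≤ 1 := by
      have h1 := hbnd (pvKey e)
      rw [keyCnt_append, keyCnt_cons] at h1
      simp at h1
      omega
    rw [List.foldl_cons, bStep_eq p e hle]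
    have hrw : (p ++ [e]) ++ U' = p ++ e :: U' := by simp
    have := ih (p ++ [e]) (by rw [hrw]; exact hbnd)
    rw [hrw] at this
    exact this

theorem pre_bounded {edges : List (List Int)} (h : Pre_getBoundaryEdges edges) :
    ∀ k, keyCnt edges k ≤ 2 := by
  intro k
  by_contra hgt
  obtain ⟨e, he, hek⟩ := exists_of_keyCnt_pos (l := edges) (k := k) (by omega)
  have := h e he
  rw [hek] at this
  omega

-- ===== VERDICT (by name: the statement is the Claim_ definition above) =====
theorem getBoundaryEdges_spec : Claim_equal_getBoundaryEdges := by
  intro edges _ hpre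
  have hb := pre_bounded hpre
  unfold Spec_getBoundaryEdges getBoundaryEdges getBoundaryEdges_alt
  have hA := outer_spec (2 * edges.length + 1) [] edges (by omega) (by simpa using hb)
    (by simp)
  have hB := fold_spec edges [] (by simpa using hb)
  simp only [List.nil_append, List.length_nil] at hA hB
  rw [hA]
  have hempty : PySem.Dict.empty = bDict [] := by
    unfold bDict; rfl
  rw [hempty, hB]
  unfold bDict
  rw [PySem.Dict.values_mk, List.map_map]
  have hid : ((fun x : List Int × List Int => x.2) ∘ fun e => (pvKey e, e)) = id := rfl
  rw [hid, List.map_id]
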